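-- pv_equiv track=rewrite | github.com/rmathur1482/test_corrections | testcorrections.py | count_proteins
-- ===== SOURCE A (Python) =====
-- def count_proteins(list_protein):
--     protein_freq = {}
--     protein_families = [i[:7] for i in list_protein]
--     for i in protein_families:
--         if i in protein_freq:
--             protein_freq[i] += 1
--         else:
--             protein_freq[i] = 1
--     return protein_freq
-- ===== SOURCE B (Python) =====
-- def count_proteins(list_protein):
--     # Dedup-then-count: take distinct prefixes in first-occurrence order,
--     # then assign each its total count in one comprehension-style pass.
--     prefixes = [p[:7] for p in list_protein]
--     result = {}
--     for key in dict.fromkeys(prefixes):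
--         result[key] = prefixes.count(key)
--     return result
-- ===== Notes on version B (the rewrite author's own statement) =====
-- stated objective: alternative
-- what changed: B replaces A's single hashing scan that increments counts with an ordered dedup of the prefixes followed by a count() pass per distinct key.
import Mathlib
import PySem

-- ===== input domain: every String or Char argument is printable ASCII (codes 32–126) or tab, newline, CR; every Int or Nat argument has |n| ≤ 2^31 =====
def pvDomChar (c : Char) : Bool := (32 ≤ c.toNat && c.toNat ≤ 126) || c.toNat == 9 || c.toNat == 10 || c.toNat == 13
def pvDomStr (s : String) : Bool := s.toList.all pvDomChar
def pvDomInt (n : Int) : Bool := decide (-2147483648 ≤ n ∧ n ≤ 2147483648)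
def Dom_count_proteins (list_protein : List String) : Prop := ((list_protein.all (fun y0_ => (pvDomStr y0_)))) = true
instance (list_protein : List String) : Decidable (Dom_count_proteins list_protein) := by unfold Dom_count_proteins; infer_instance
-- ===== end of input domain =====

-- B replaces A's single hashing count-increment scan with an ordered dedup of the prefixes
-- followed by a count per distinct key (alternative decomposition, same return value).


-- ===== PORT A =====
def count_proteins (list_protein : List String) : List (String × Int) :=
  let protein_families := list_protein.map (fun i => PySem.Str.slice i none (some 7))
  let protein_freq := protein_families.foldl
    (fun d i => if d.contains i then d.insert i (d.getD i 0 + 1) else d.insert i 1)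
    PySem.Dict.empty
  protein_freq.items

-- ===== PORT B =====
def count_proteins_alt (list_protein : List String) : List (String × Int) :=
  let prefixes := list_protein.map (fun p => PySem.Str.slice p none (some 7))
  let result := (PySem.List.dedup prefixes).foldl
    (fun d key => d.insert key ((prefixes.count key : Int)))
    PySem.Dict.empty
  result.items

-- ===== PRECONDITION & SPEC =====
def Spec_count_proteins (list_protein : List String) (out : List (String × Int)) : Prop := out = count_proteins_alt list_protein
instance (list_protein : List String) (out : List (String × Int)) : Decidable (Spec_count_proteins list_protein out) := by unfold Spec_count_proteins; infer_instance

-- ===== CLAIM (what is proved, stated in full; the proofs are below) =====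
def Claim_equal_count_proteins : Prop := ∀ (list_protein : List String), Dom_count_proteins list_protein → Spec_count_proteins list_protein (count_proteins list_protein)

-- ===== LEMMAS AND PROOFS =====

-- A's branching update is pointwise the unconditional Counter update.
theorem countA_step_eq (d : PySem.Dict String Int) (i : String) :
    (if d.contains i then d.insert i (d.getD i 0 + 1) else d.insert i 1)
      = d.insert i (d.getD i 0 + 1) := by
  by_cases h : d.contains i = true
  · simp [h]
  · have h' : d.contains i = false := by simpa using h
    simp [h', PySem.Dict.getD_of_not_contains d 0 h']

theorem countA_eq_counter (xs : List String) :
    xs.foldl (fun d i => if d.contains i then d.insert i (d.getD i 0 + 1) else d.insert i 1)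
        PySem.Dict.empty
      = PySem.Dict.counter xs := by
  have hfun : (fun (d : PySem.Dict String Int) (i : String) =>
      if d.contains i then d.insert i (d.getD i 0 + 1) else d.insert i 1)
      = fun d i => d.insert i (d.getD i 0 + 1) := by
    funext d i; exact countA_step_eq d i
  rw [hfun, PySem.Dict.foldl_insert_getD_add_one_eq_counter]

-- B's fold over the deduplicated keys inserts only fresh keys, so its items are the map.
theorem countB_items (xs : List String) :
    ((PySem.List.dedup xs).foldl (fun d key => d.insert key ((xs.count key : Int)))
        PySem.Dict.empty).items
      = (PySem.List.dedup xs).map (fun k => (k, (xs.count k : Int))) := by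
  have h := PySem.Dict.items_foldl_insert_fresh (l := PySem.List.dedup xs)
    (k := fun a => a) (v := fun a => ((xs.count a : Int))) (d := PySem.Dict.empty)
    (by intro a _; simp [PySem.Dict.contains_empty])
    (by simp [PySem.List.nodup_dedup xs])
  simpa [PySem.Dict.items] using h

-- ===== VERDICT (by name: the statement is the Claim_ definition above) =====
theorem count_proteins_spec : Claim_equal_count_proteins := by
  intro l _
  unfold Spec_count_proteins count_proteins count_proteins_alt
  show ((l.map (fun i => PySem.Str.slice i none (some 7))).foldl
      (fun d i => if d.contains i then d.insert i (d.getD i 0 + 1) else d.insert i 1)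
      PySem.Dict.empty).items
    = ((PySem.List.dedup (l.map (fun p => PySem.Str.slice p none (some 7)))).foldl
      (fun d key => d.insert key (((l.map (fun p => PySem.Str.slice p none (some 7))).count key : Int)))
      PySem.Dict.empty).items
  rw [countA_eq_counter, countB_items, PySem.Dict.items_counter]
  simp [PySem.List.dedup_eq_ofList]
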